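-- pv_equiv track=rewrite | github.com/harsh1424/pw-ppt-dsa-assignment | Array 2/2candy_type.py | candy_type_to_eat
-- ===== SOURCE A (Python) =====
-- def candy_type_to_eat(candy_type):
--     total_candies = len(candy_type)
--     unique_candy_type = []
--     for i in range(len(candy_type)):
--         if candy_type[i] not in unique_candy_type:
--             unique_candy_type.append(candy_type[i])
--
--     unique_candies = len(unique_candy_type)
--
--     if unique_candies <= total_candies/2:
--         return unique_candies
--     else:
--         return int(total_candies/2)
-- ===== SOURCE B (Python) =====
-- def candy_type_to_eat(candy_type):
--     s = sorted(candy_type)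
--     distinct = 1 if s else 0
--     for prev, cur in zip(s, s[1:]):
--         if cur != prev:
--             distinct += 1
--     return min(distinct, len(candy_type) // 2)
-- ===== Notes on version B (the rewrite author's own statement) =====
-- stated objective: faster
-- what changed: Replaced A's quadratic build-a-unique-list loop (repeated 'not in' scans) by sort-then-one-adjacent-pass: sort a copy, count positions whose value differs from the predecessor, return min(that count, n//2).
import Mathlib
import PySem

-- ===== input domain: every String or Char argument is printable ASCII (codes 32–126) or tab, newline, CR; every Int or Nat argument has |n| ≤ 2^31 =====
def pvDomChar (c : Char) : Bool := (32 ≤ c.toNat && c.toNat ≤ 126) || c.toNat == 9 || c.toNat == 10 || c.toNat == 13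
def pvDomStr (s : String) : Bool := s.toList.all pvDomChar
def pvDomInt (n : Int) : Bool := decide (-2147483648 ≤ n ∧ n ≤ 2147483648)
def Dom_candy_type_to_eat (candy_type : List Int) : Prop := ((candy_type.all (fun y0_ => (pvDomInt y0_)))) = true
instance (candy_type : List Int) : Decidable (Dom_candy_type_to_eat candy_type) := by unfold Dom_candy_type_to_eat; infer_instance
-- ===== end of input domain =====

-- B (faster): sort a copy and count distinct values in ONE adjacent-comparison pass,
-- instead of A's quadratic unique-list loop with repeated 'not in' scans; same value always.
-- ===== PORT A =====
def candy_type_to_eat (candy_type : List Int) : Int :=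
  let total_candies : Int := candy_type.length
  let unique_candy_type :=
    (PySem.List.pyRange 0 candy_type.length 1).foldl
      (fun acc i =>
        if PySem.List.pyGetD candy_type i 0 ∈ acc then acc
        else acc ++ [PySem.List.pyGetD candy_type i 0]) []
  let unique_candies : Int := unique_candy_type.length
  -- 'unique_candies <= total_candies/2' in Python is a float compare; both sides are small
  -- integers/half-integers, so it is exactly 2*unique_candies ≤ total_candies.
  if unique_candies * 2 ≤ total_candies then unique_candies
  -- int(total_candies/2): truncating division, exact for |total| < 2^53.
  else PySem.Int.truncdiv total_candies 2

-- ===== PORT B =====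
def candy_type_to_eat_alt (candy_type : List Int) : Int :=
  let s := PySem.List.sorted candy_type (fun x => x) false
  -- 'for prev, cur in zip(s, s[1:])' ; s[1:] = PySem.List.slice s (some 1) none
  let distinct : Int :=
    (s.zip (PySem.List.slice s (some 1) none)).foldl
      (fun d p => if p.2 ≠ p.1 then d + 1 else d)
      (if s.isEmpty then 0 else 1)
  min distinct (PySem.Int.floordiv (candy_type.length : Int) 2)

-- ===== PRECONDITION & SPEC =====
def Spec_candy_type_to_eat (candy_type : List Int) (out : Int) : Prop := out = candy_type_to_eat_alt candy_type
instance (candy_type : List Int) (out : Int) : Decidable (Spec_candy_type_to_eat candy_type out) := by unfold Spec_candy_type_to_eat; infer_instance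

-- ===== CLAIM (what is proved, stated in full; the proofs are below) =====
def Claim_equal_candy_type_to_eat : Prop := ∀ (candy_type : List Int), Dom_candy_type_to_eat candy_type → Spec_candy_type_to_eat candy_type (candy_type_to_eat candy_type)

-- ===== LEMMAS AND PROOFS =====

-- A's unique-list accumulation is literally set(xs) built in first-occurrence order.
theorem candy_uniq_eq_ofList (xs : List Int) :
    xs.foldl (fun acc x => if x ∈ acc then acc else acc ++ [x]) [] = PySem.Set.ofList xs := by
  simp only [PySem.Set.ofList, PySem.Set.empty]
  congr 1
  funext acc x
  simp [PySem.Set.add, PySem.Set.contains]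

-- a fold that adds 0 or 1 per element is init + a countP
theorem candy_foldl_count (L : List (Int × Int)) (c : Int) :
    L.foldl (fun d p => if p.2 ≠ p.1 then d + 1 else d) c
      = c + ((L.countP (fun p => p.2 != p.1) : Nat) : Int) := by
  induction L generalizing c with
  | nil => simp
  | cons p t ih =>
      simp only [List.foldl_cons, List.countP_cons, ih]
      by_cases h : p.2 = p.1
      · simp [h]
      · simp [h]; ring

-- on a nondecreasing list, (1 +) the number of adjacent unequal pairs = number of distinct values
theorem candy_adj_count_sorted (l : List Int) (h : l.Pairwise (· ≤ ·)) :
    (if l.isEmpty then 0 else 1) + (l.zip (l.drop 1)).countP (fun p => p.2 != p.1)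
      = l.toFinset.card := by
  induction l with
  | nil => simp
  | cons x t ih =>
      cases t with
      | nil => simp
      | cons y t' =>
          have hxy : x ≤ y := List.rel_of_pairwise_cons h (by simp)
          have hxt : ∀ z ∈ t', x ≤ z := fun z hz => List.rel_of_pairwise_cons h (by simp [hz])
          have hyt : ∀ z ∈ t', y ≤ z :=
            fun z hz => List.rel_of_pairwise_cons (List.Pairwise.of_cons h) hz
          have ih' := ih (List.Pairwise.of_cons h)
          simp only [List.isEmpty_cons, List.drop_succ_cons, List.drop_zero,
            List.zip_cons_cons, List.countP_cons, Bool.false_eq_true, if_false] at ih' ⊢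
          by_cases hxy' : x = y
          · subst hxy'
            simp only [List.toFinset_cons, Finset.insert_idem, bne_self_eq_false,
              Bool.false_eq_true, if_false]
            simpa using ih'
          · have hxnot : x ∉ (y :: t').toFinset := by
              simp only [List.toFinset_cons, Finset.mem_insert, List.mem_toFinset]
              rintro (rfl | hz)
              · exact hxy' rfl
              · have h1 := hyt x hz
                omega
            rw [List.toFinset_cons, Finset.card_insert_of_notMem hxnot]
            have hb : ((y != x) = true) := by simp [Ne.symm hxy']
            simp only [hb, if_true]
            omega

-- set(xs) has as many elements as xs has distinct values
theorem candy_ofList_length (xs : List Int) :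
    (PySem.Set.ofList xs).length = xs.toFinset.card := by
  have hnd : (PySem.Set.ofList xs).Nodup := PySem.Set.nodup_ofList xs
  have hfs : (PySem.Set.ofList xs).toFinset = xs.toFinset := by
    ext z
    simp [List.mem_toFinset, PySem.Set.mem_ofList]
  calc (PySem.Set.ofList xs).length
      = (PySem.Set.ofList xs).toFinset.card := (List.toFinset_card_of_nodup hnd).symm
    _ = xs.toFinset.card := by rw [hfs]

-- ===== VERDICT (by name: the statement is the Claim_ definition above) =====
theorem candy_type_to_eat_spec : Claim_equal_candy_type_to_eat := by
  intro candy_type _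
  have h1 := PySem.List.foldl_pyRange_zero_pyGetD' (xs := candy_type) (d := (0:Int))
      (f := fun acc x => if x ∈ acc then acc else acc ++ [x]) (init := ([] : List Int))
  unfold Spec_candy_type_to_eat
  simp only [candy_type_to_eat, candy_type_to_eat_alt, PySem.List.slice_from_one,
    ← List.drop_one, h1, candy_uniq_eq_ofList, candy_foldl_count]
  set s := PySem.List.sorted candy_type (fun x => x) false with hs
  have hadj := candy_adj_count_sorted s (PySem.List.sorted_pairwise candy_type (fun x => x))
  have hperm : s.Perm candy_type := PySem.List.sorted_perm candy_type (fun x => x) false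
  have hfs : s.toFinset = candy_type.toFinset := by
    ext z; simp [List.mem_toFinset, hperm.mem_iff]
  have hlen : s.length = candy_type.length := hperm.length_eq
  have hcard := candy_ofList_length candy_type
  have hle : candy_type.toFinset.card ≤ candy_type.length := by
    rw [← hcard]; exact PySem.Set.length_ofList_le candy_type
  set n := candy_type.length with hn
  have hf : PySem.Int.floordiv (n : Int) 2 = ((n / 2 : Nat) : Int) := by
    exact_mod_cast PySem.Int.floordiv_natCast n 2
  have ht : PySem.Int.truncdiv (n : Int) 2 = ((n / 2 : Nat) : Int) := by
    simp [PySem.Int.truncdiv, Int.tdiv]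
  have hempty : (if s.isEmpty then (0:Int) else 1) = (if n = 0 then 0 else 1) := by
    cases hcase : s with
    | nil => simp [hcase] at hlen ⊢; omega
    | cons a l => have hne : n ≠ 0 := by simp [hcase] at hlen; omega
                  simp [hne]
  rw [hcard, hf, ht, hempty, ← hfs]
  rw [min_def]
  have hadj' : (if n = 0 then (0:Int) else 1) + ((s.zip (s.drop 1)).countP (fun p => p.2 != p.1) : Int)
      = (s.toFinset.card : Int) := by
    rw [← hadj]
    have : s.isEmpty = decide (n = 0) := by
      cases hcase : s with
      | nil => simp [hcase] at hlen ⊢; omega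
      | cons a l => have hne : n ≠ 0 := by simp [hcase] at hlen; omega
                    simp [hne]
    rw [this]
    by_cases h : n = 0 <;> simp [h]
  rw [hadj'] at *
  split_ifs <;> push_cast <;> omega
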